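-- pv_equiv track=rewrite | github.com/Yomguithereal/ebbe | ebbe/iter.py | with_prev_and_next
-- ===== SOURCE A (Python) =====
-- from typing import (
--     Any,
--     Iterator,
--     Iterable,
--     List,
--     Union,
--     Tuple,
--     TypeVar,
--     Optional,
--     Callable,
--     Sequence,
--     overload,
-- )
--
-- T = TypeVar("T")
--
-- def with_prev_and_next(
--     iterable: Iterable[T],
-- ) -> Iterator[Tuple[Optional[T], T, Optional[T]]]:
--     prev = None
--     iterator = iter(iterable)
--
--     try:
--         last = next(iterator)
--     except StopIteration:
--         return
--
--     for item in iterator: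
--         yield prev, last, item
--         prev = last
--         last = item
--
--     yield prev, last, None
-- ===== SOURCE B (Python) =====
-- from itertools import tee, chain, islice
--
--
-- def with_prev_and_next(iterable):
--     prevs, currents, nexts = tee(iterable, 3)
--     yield from zip(
--         chain([None], prevs),
--         currents,
--         chain(islice(nexts, 1, None), [None]),
--     )
-- ===== Notes on version B (the rewrite author's own statement) =====
-- stated objective: idiomatic
-- what changed: Replaces the manual prev/last state machine with three tee'd iterators shifted by chain/islice and aligned by zip.
import Mathlib
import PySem

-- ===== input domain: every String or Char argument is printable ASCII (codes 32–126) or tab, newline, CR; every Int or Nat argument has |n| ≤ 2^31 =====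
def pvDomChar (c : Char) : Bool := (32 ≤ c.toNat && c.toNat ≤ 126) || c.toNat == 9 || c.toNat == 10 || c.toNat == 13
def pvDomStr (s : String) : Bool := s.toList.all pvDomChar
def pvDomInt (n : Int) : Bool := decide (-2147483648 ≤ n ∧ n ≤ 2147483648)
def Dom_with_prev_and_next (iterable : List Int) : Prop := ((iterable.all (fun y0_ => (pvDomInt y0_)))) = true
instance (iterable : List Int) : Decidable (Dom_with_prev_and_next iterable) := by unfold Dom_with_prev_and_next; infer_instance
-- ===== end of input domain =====

-- ===== PORT A =====
-- loop of A: carries (prev, last), yields (prev, last, item) per item, then the final (prev, last, None)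
def wpnLoop (prev : Option Int) (last : Int) : List Int → List (Option Int × Int × Option Int)
  | [] => [(prev, last, none)]
  | item :: rest => (prev, last, some item) :: wpnLoop (some last) item rest

def with_prev_and_next (iterable : List Int) : List (Option Int × Int × Option Int) :=
  match iterable with
  | [] => []
  | first :: rest => wpnLoop none first rest

-- ===== PORT B =====
-- B: zip of three shifted streams (chain([None], prevs), currents, chain(islice(nexts,1,None), [None]))
def with_prev_and_next_alt (iterable : List Int) : List (Option Int × Int × Option Int) :=
  (none :: iterable.map some).zip (iterable.zip (iterable.tail.map some ++ [none]))

-- ===== PRECONDITION & SPEC =====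
def Spec_with_prev_and_next (iterable : List Int) (out : List (Option Int × Int × Option Int)) : Prop := out = with_prev_and_next_alt iterable
instance (iterable : List Int) (out : List (Option Int × Int × Option Int)) : Decidable (Spec_with_prev_and_next iterable out) := by unfold Spec_with_prev_and_next; infer_instance

-- ===== CLAIM (what is proved, stated in full; the proofs are below) =====
def Claim_equal_with_prev_and_next : Prop := ∀ (iterable : List Int), Dom_with_prev_and_next iterable → Spec_with_prev_and_next iterable (with_prev_and_next iterable)

-- ===== LEMMAS AND PROOFS =====
-- B replaces the prev/last state machine by zipping three shifted copies of the list (idiomatic).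

-- ===== VERDICT (by name: the statement is the Claim_ definition above) =====
theorem wpnLoop_eq (prev : Option Int) (last : Int) (rest : List Int) :
    wpnLoop prev last rest =
      (prev :: (last :: rest).map some).zip ((last :: rest).zip (rest.map some ++ [none])) := by
  induction rest generalizing prev last with
  | nil => simp [wpnLoop]
  | cons x r ih => simp [wpnLoop, ih]

theorem with_prev_and_next_spec : Claim_equal_with_prev_and_next := by
  intro iterable _
  unfold Spec_with_prev_and_next
  cases iterable with
  | nil => rfl
  | cons x rest =>
    simp [with_prev_and_next, with_prev_and_next_alt, wpnLoop_eq]
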